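-- pv_equiv track=rewrite | github.com/ogm1088/HW4 | heuristic.py | is_one_side_open
-- ===== SOURCE A (Python) =====
-- def is_one_side_open(board, row, col, direction, length, player):
--     """
--     Check if a given sequence is one-side-open, meaning one end of the sequence is open (empty).
--     :param board: The current game board.
--     :param row: Starting row of the sequence.
--     :param col: Starting column of the sequence.
--     :param direction: The direction of the sequence (horizontal, vertical, diagonal1, diagonal2).
--     :param length: The length of the sequence to check (typically 2 or 3).
--     :param player: The player ('X' or 'O') for whom the sequence is being checked.
--     :return: True if the sequence is one-side-open, False otherwise.
--     """
--     # Check for horizontal direction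
--     if direction == 'horizontal':
--         if col + length - 1 < len(board[0]) and all(board[row][col + i] == player for i in range(length)):
--             # Check if one side is open
--             if (col - 1 >= 0 and board[row][col - 1] == ' ') or (col + length < len(board[0]) and board[row][col + length] == ' '):
--                 return True
--
--     # Check for vertical direction
--     elif direction == 'vertical':
--         if row + length - 1 < len(board) and all(board[row + i][col] == player for i in range(length)):
--             if (row - 1 >= 0 and board[row - 1][col] == ' ') or (row + length < len(board) and board[row + length][col] == ' '):
--                 return True
--
--     # Check diagonal (bottom-left to top-right)
--     elif direction == 'diagonal1':
--         if row + length - 1 < len(board) and col + length - 1 < len(board[0]) and all(board[row + i][col + i] == player for i in range(length)):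
--             if (row - 1 >= 0 and col - 1 >= 0 and board[row - 1][col - 1] == ' ') or (row + length < len(board) and col + length < len(board[0]) and board[row + length][col + length] == ' '):
--                 return True
--
--     # Check diagonal (top-left to bottom-right)
--     elif direction == 'diagonal2':
--         if row - length + 1 >= 0 and col + length - 1 < len(board[0]) and all(board[row - i][col + i] == player for i in range(length)):
--             if (row + 1 < len(board) and col - 1 >= 0 and board[row + 1][col - 1] == ' ') or (row - length >= 0 and col + length < len(board[0]) and board[row - length][col + length] == ' '):
--                 return True
--     return False
-- ===== SOURCE B (Python) =====
-- def _line(board, row, col, direction):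
--     """Reduce to 1D: the full board line through (row, col) in `direction`,
--     together with the position of (row, col) in that line; None if `direction`
--     names no line."""
--     H, W = len(board), len(board[0])
--     if direction == 'horizontal':
--         return board[row], col
--     if direction == 'vertical':
--         return [r[col] for r in board], row
--     if direction == 'diagonal1':
--         k = min(row, col)
--         n = k + min(H - row, W - col)
--         return [board[row - k + t][col - k + t] for t in range(n)], k
--     if direction == 'diagonal2':
--         k = min(H - 1 - row, col)
--         n = k + min(row + 1, W - col)
--         return [board[row + k - t][col - k + t] for t in range(n)], k
--     return None
--
--
-- def is_one_side_open(board, row, col, direction, length, player):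
--     lp = _line(board, row, col, direction)
--     if lp is None:
--         return False
--     line, p = lp
--     if line[p:p + length] != [player] * length:
--         return False
--     return (p > 0 and line[p - 1] == ' ') or \
--            (p + length < len(line) and line[p + length] == ' ')
-- ===== Notes on version B (the rewrite author's own statement) =====
-- stated objective: alternative
-- what changed: A checks four separately-coded 2D index patterns with guarded all() scans; B reduces every direction to one 1D problem: it materializes the full board line (row, column or diagonal) through the start cell together with the start's position p in it, then decides by one slice comparison line[p:p+length] == [player]*length and a look at the two neighbouring line cells.
-- outside the precondition, e.g. on is_one_side_open([['X'], ['X', 'X', ' ']], 1, 0, 'horizontal', 2, 'X'): A returns False, B returns True; on is_one_side_open([['X', ' ']], -1, 0, 'diagonal1', 1, 'X'): A returns True, B returns False; on is_one_side_open([['O'], [' ']], 3, 2, 'horizontal', 1, ' '): A returns False, B raises IndexError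
import Mathlib
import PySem

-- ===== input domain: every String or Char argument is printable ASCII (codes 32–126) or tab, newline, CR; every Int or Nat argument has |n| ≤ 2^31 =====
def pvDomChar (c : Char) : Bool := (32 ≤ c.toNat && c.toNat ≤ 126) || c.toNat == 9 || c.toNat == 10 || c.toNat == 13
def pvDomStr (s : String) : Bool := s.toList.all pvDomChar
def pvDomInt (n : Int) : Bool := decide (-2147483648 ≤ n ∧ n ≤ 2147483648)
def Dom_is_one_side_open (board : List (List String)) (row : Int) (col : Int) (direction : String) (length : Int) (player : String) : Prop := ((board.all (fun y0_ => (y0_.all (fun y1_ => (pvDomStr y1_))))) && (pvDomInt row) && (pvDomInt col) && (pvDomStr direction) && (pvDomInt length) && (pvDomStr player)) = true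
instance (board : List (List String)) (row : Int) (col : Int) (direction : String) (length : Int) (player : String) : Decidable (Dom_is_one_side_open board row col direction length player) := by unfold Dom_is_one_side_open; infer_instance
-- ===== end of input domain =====

-- B replaces A's four separately-coded 2D index patterns by a reduction to one 1D problem:
-- materialize the full board line through the start cell, then one slice comparison against
-- [player]*length plus a look at the two neighbouring line cells (objective: alternative).

-- ===== PORT A =====
-- board[r][c] (Python indexing); the defaults are unreachable under Pre_.
def pvCell (board : List (List String)) (r c : Int) : String :=
  PySem.List.pyGetD (PySem.List.pyGetD board r ([] : List String)) c ""

-- len(board[0]); the default is unreachable under Pre_.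
def pvW (board : List (List String)) : Int :=
  ((PySem.List.pyGetD board 0 ([] : List String)).length : Int)

def is_one_side_open (board : List (List String)) (row : Int) (col : Int) (direction : String) (length : Int) (player : String) : Bool :=
  if direction == "horizontal" then
    if (col + length - 1 < pvW board) &&
       ((PySem.List.pyRange 0 length 1).all fun i => pvCell board row (col + i) == player) then
      if (col - 1 ≥ 0 && pvCell board row (col - 1) == " ") ||
         (col + length < pvW board && pvCell board row (col + length) == " ") then true
      else false
    else false
  else if direction == "vertical" then
    if (row + length - 1 < (board.length : Int)) &&
       ((PySem.List.pyRange 0 length 1).all fun i => pvCell board (row + i) col == player) then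
      if (row - 1 ≥ 0 && pvCell board (row - 1) col == " ") ||
         (row + length < (board.length : Int) && pvCell board (row + length) col == " ") then true
      else false
    else false
  else if direction == "diagonal1" then
    if (row + length - 1 < (board.length : Int)) && (col + length - 1 < pvW board) &&
       ((PySem.List.pyRange 0 length 1).all fun i => pvCell board (row + i) (col + i) == player) then
      if (row - 1 ≥ 0 && col - 1 ≥ 0 && pvCell board (row - 1) (col - 1) == " ") ||
         (row + length < (board.length : Int) && col + length < pvW board &&
          pvCell board (row + length) (col + length) == " ") then true
      else false
    else false
  else if direction == "diagonal2" then
    if (row - length + 1 ≥ 0) && (col + length - 1 < pvW board) &&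
       ((PySem.List.pyRange 0 length 1).all fun i => pvCell board (row - i) (col + i) == player) then
      if (row + 1 < (board.length : Int) && col - 1 ≥ 0 && pvCell board (row + 1) (col - 1) == " ") ||
         (row - length ≥ 0 && col + length < pvW board &&
          pvCell board (row - length) (col + length) == " ") then true
      else false
    else false
  else false

-- ===== PORT B =====
-- _line of Source B: the full board line through (row, col) in `direction` and the position of
-- (row, col) in it; none if `direction` names no line (list comprehensions → pyRange maps).
def pvLine (board : List (List String)) (row col : Int) (direction : String) :
    Option (List String × Int) :=
  if direction == "horizontal" then
    some (PySem.List.pyGetD board row ([] : List String), col)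
  else if direction == "vertical" then
    some (board.map (fun r => PySem.List.pyGetD r col ""), row)
  else if direction == "diagonal1" then
    let k := min row col
    let n := k + min ((board.length : Int) - row) (pvW board - col)
    some ((PySem.List.pyRange 0 n 1).map (fun t => pvCell board (row - k + t) (col - k + t)), k)
  else if direction == "diagonal2" then
    let k := min ((board.length : Int) - 1 - row) col
    let n := k + min (row + 1) (pvW board - col)
    some ((PySem.List.pyRange 0 n 1).map (fun t => pvCell board (row + k - t) (col - k + t)), k)
  else none

def is_one_side_open_alt (board : List (List String)) (row : Int) (col : Int) (direction : String) (length : Int) (player : String) : Bool :=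
  match pvLine board row col direction with
  | none => false
  | some (line, p) =>
    if PySem.List.slice line (some p) (some (p + length)) != List.replicate length.toNat player then
      false
    else
      (p > 0 && PySem.List.pyGetD line (p - 1) "" == " ") ||
      (p + length < (line.length : Int) && PySem.List.pyGetD line (p + length) "" == " ")

-- ===== PRECONDITION & SPEC =====
-- Pre_ restricts to the natural domain of a board-position query — a nonempty board and, for the
-- four real directions, a rectangular board, an in-range start cell and a nonnegative length —
-- because outside it A's values come from negative-index wraparound or ragged-row accidents of
-- Python indexing (or A raises IndexError), behaviour B's line-based algorithm does not share.
def Pre_is_one_side_open (board : List (List String)) (row : Int) (col : Int) (direction : String) (length : Int) (player : String) : Prop :=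
  board ≠ [] ∧
  ((direction = "horizontal" ∨ direction = "vertical" ∨ direction = "diagonal1" ∨ direction = "diagonal2") →
    (∀ r ∈ board, (r.length : Int) = pvW board) ∧
    0 ≤ row ∧ row < (board.length : Int) ∧ 0 ≤ col ∧ col < pvW board ∧ 0 ≤ length)

instance (board : List (List String)) (row : Int) (col : Int) (direction : String) (length : Int) (player : String) : Decidable (Pre_is_one_side_open board row col direction length player) := by
  unfold Pre_is_one_side_open; infer_instance

def pvWitness_is_one_side_open : List (List String) × Int × Int × String × Int × String :=
  ([[" ", "X", "X", " "]], 0, 1, "horizontal", 2, "X")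

def Spec_is_one_side_open (board : List (List String)) (row : Int) (col : Int) (direction : String) (length : Int) (player : String) (out : Bool) : Prop := out = is_one_side_open_alt board row col direction length player
instance (board : List (List String)) (row : Int) (col : Int) (direction : String) (length : Int) (player : String) (out : Bool) : Decidable (Spec_is_one_side_open board row col direction length player out) := by unfold Spec_is_one_side_open; infer_instance

-- ===== CLAIM (what is proved, stated in full; the proofs are below) =====
def Claim_equal_is_one_side_open : Prop := ∀ (board : List (List String)) (row : Int) (col : Int) (direction : String) (length : Int) (player : String), Dom_is_one_side_open board row col direction length player → Pre_is_one_side_open board row col direction length player → Spec_is_one_side_open board row col direction length player (is_one_side_open board row col direction length player)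

-- ===== LEMMAS AND PROOFS =====

-- all over the same list of two pointwise-(on members)-equal predicates
theorem pvAllCongrMem {α : Type} (l : List α) (p q : α → Bool)
    (h : ∀ x ∈ l, p x = q x) : l.all p = l.all q := by
  induction l with
  | nil => rfl
  | cons a t ih => simp only [List.all_cons, h a (by simp), ih (fun x hx => h x (by simp [hx]))]

-- if-shape bridges between the two programs' control flow
theorem pvIfA (c e : Bool) : (if c then (if e then true else false) else false) = (c && e) := by
  cases c <;> cases e <;> rfl

theorem pvIfB {α : Type} [BEq α] (x y : α) (e : Bool) :
    (if x != y then false else e) = ((x == y) && e) := by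
  cases h : x == y <;> simp [bne, h]

-- the slice test of B equals the far-bound guard plus the element scan of A
theorem pvSliceRep (line : List String) (p n : Int) (player : String)
    (hp0 : 0 ≤ p) (hpl : p < (line.length : Int)) (hn : 0 ≤ n) :
    (PySem.List.slice line (some p) (some (p + n)) == List.replicate n.toNat player) =
      (decide (p + n - 1 < (line.length : Int)) &&
        (PySem.List.pyRange 0 n 1).all (fun i => PySem.List.pyGetD line (p + i) "" == player)) := by
  rw [PySem.List.slice_toNat line hp0 (by omega)]
  have hnn : (p + n).toNat - p.toNat = n.toNat := by omega
  rw [hnn]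
  have hlen' : (List.take n.toNat (List.drop p.toNat line)).length = min n.toNat (line.length - p.toNat) := by
    simp [List.length_take, List.length_drop]
  rw [Bool.eq_iff_iff]
  simp only [beq_iff_eq, Bool.and_eq_true, decide_eq_true_eq, List.all_eq_true,
    PySem.List.mem_pyRange_one, List.eq_replicate_iff]
  constructor
  · rintro ⟨hlen, hmem⟩
    have hple : p + n ≤ (line.length : Int) := by omega
    refine ⟨by omega, fun i ⟨hi0, hin⟩ => ?_⟩
    rw [PySem.List.pyGetD_eq_getElem line "" (by omega) (by omega)]
    have hib : i.toNat < (List.take n.toNat (List.drop p.toNat line)).length := by omega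
    have hg := hmem _ (List.getElem_mem hib)
    rw [List.getElem_take, List.getElem_drop] at hg
    convert hg using 2
    omega
  · rintro ⟨hb, hmem⟩
    refine ⟨by omega, fun b hbmem => ?_⟩
    rw [List.mem_iff_getElem] at hbmem
    obtain ⟨j, hj, rfl⟩ := hbmem
    rw [List.getElem_take, List.getElem_drop]
    have := hmem (j : Int) ⟨by omega, by omega⟩
    rw [PySem.List.pyGetD_eq_getElem line "" (by omega) (by omega)] at this
    convert this using 2
    omega

theorem pvHor (board : List (List String)) (row col length : Int) (player : String)
    (hrect : ∀ r ∈ board, (r.length : Int) = pvW board)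
    (hr0 : 0 <= row) (hrH : row < (board.length : Int))
    (hc0 : 0 <= col) (hcW : col < pvW board) (hl : 0 <= length) :
    is_one_side_open board row col "horizontal" length player =
      is_one_side_open_alt board row col "horizontal" length player := by
  have hmem : PySem.List.pyGetD board row ([] : List String) ∈ board := by
    apply PySem.List.pyGetD_mem
    unfold PySem.Raise.InRange; omega
  have hlen : ((PySem.List.pyGetD board row ([] : List String)).length : Int) = pvW board :=
    hrect _ hmem
  unfold is_one_side_open is_one_side_open_alt pvLine
  simp only [beq_self_eq_true, if_true]
  rw [pvIfA, pvIfB]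
  rw [pvSliceRep _ col length player hc0 (by omega) hl]
  rw [hlen]
  simp only [pvCell]
  rw [show (decide (col - 1 >= 0)) = (decide (col > 0)) from decide_eq_decide.mpr (by omega)]

-- B's vertical line cell is A's board cell, for every (also wrapping) index
theorem pvCellV (board : List (List String)) (col i : Int) :
    PySem.List.pyGetD (board.map (fun r => PySem.List.pyGetD r col "")) i "" = pvCell board i col := by
  have h0 : PySem.List.pyGetD ([] : List String) col "" = "" := by
    simp [PySem.List.pyGetD, PySem.List.pyGet?]
  calc PySem.List.pyGetD (board.map (fun r => PySem.List.pyGetD r col "")) i ""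
      = PySem.List.pyGetD (board.map (fun r => PySem.List.pyGetD r col "")) i
          (PySem.List.pyGetD ([] : List String) col "") := by rw [h0]
    _ = pvCell board i col := PySem.List.pyGetD_map _ board i ([] : List String)

theorem pvVer (board : List (List String)) (row col length : Int) (player : String)
    (hr0 : 0 <= row) (hrH : row < (board.length : Int)) (hl : 0 <= length) :
    is_one_side_open board row col "vertical" length player =
      is_one_side_open_alt board row col "vertical" length player := by
  have e1 : (("vertical" : String) == "horizontal") = false := by decide
  unfold is_one_side_open is_one_side_open_alt pvLine
  simp only [e1, Bool.false_eq_true, if_false, beq_self_eq_true, if_true]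
  rw [pvIfA, pvIfB]
  rw [pvSliceRep _ row length player hr0 (by simp; omega) hl]
  simp only [pvCellV, List.length_map]
  rw [show (decide (row - 1 >= 0)) = (decide (row > 0)) from decide_eq_decide.mpr (by omega)]

theorem pvDiag1 (board : List (List String)) (row col length : Int) (player : String)
    (hr0 : 0 <= row) (hrH : row < (board.length : Int))
    (hc0 : 0 <= col) (hcW : col < pvW board) (hl : 0 <= length) :
    is_one_side_open board row col "diagonal1" length player =
      is_one_side_open_alt board row col "diagonal1" length player := by
  have e1 : (("diagonal1" : String) == "horizontal") = false := by decide
  have e2 : (("diagonal1" : String) == "vertical") = false := by decide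
  unfold is_one_side_open is_one_side_open_alt pvLine
  simp only [e1, e2, Bool.false_eq_true, if_false, beq_self_eq_true, if_true]
  rw [pvIfA, pvIfB]
  generalize hk : min row col = k
  generalize hm : min ((board.length : Int) - row) (pvW board - col) = m
  have hk0 : 0 <= k := by omega
  have hm1 : 1 <= m := by omega
  have hlenL : ((((PySem.List.pyRange 0 (k + m) 1).map
      (fun t => pvCell board (row - k + t) (col - k + t))).length : Int)) = k + m := by
    simp [PySem.List.length_pyRange_one]; omega
  rw [pvSliceRep _ k length player hk0 (by rw [hlenL]; omega) hl, hlenL]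
  have hcell : ∀ t : Int, 0 <= t → t < k + m →
      PySem.List.pyGetD ((PySem.List.pyRange 0 (k + m) 1).map
        (fun t => pvCell board (row - k + t) (col - k + t))) t "" =
        pvCell board (row - k + t) (col - k + t) :=
    fun t h1 h2 => PySem.List.pyGetD_map_pyRange_of_nonneg _ (k + m) t "" h1 h2
  by_cases hg : length <= m
  · have f1 : row + length - 1 < (board.length : Int) := by omega
    have f2 : col + length - 1 < pvW board := by omega
    have f3 : k + length - 1 < k + m := by omega
    have hscan : ((PySem.List.pyRange 0 length 1).all fun i =>
        PySem.List.pyGetD ((PySem.List.pyRange 0 (k + m) 1).map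
          (fun t => pvCell board (row - k + t) (col - k + t))) (k + i) "" == player) =
        ((PySem.List.pyRange 0 length 1).all fun i => pvCell board (row + i) (col + i) == player) := by
      apply pvAllCongrMem
      intro i hi
      rw [PySem.List.mem_pyRange_one] at hi
      rw [hcell (k + i) (by omega) (by omega)]
      rw [show row - k + (k + i) = row + i from by omega, show col - k + (k + i) = col + i from by omega]
    rw [hscan]
    simp only [f1, f2, f3, decide_true]
    have hends : (decide (k > 0) && PySem.List.pyGetD ((PySem.List.pyRange 0 (k + m) 1).map
          (fun t => pvCell board (row - k + t) (col - k + t))) (k - 1) "" == " " ||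
        decide (k + length < k + m) && PySem.List.pyGetD ((PySem.List.pyRange 0 (k + m) 1).map
          (fun t => pvCell board (row - k + t) (col - k + t))) (k + length) "" == " ") =
        (decide (row - 1 >= 0) && (decide (col - 1 >= 0) && pvCell board (row - 1) (col - 1) == " ") ||
         decide (row + length < (board.length : Int)) && (decide (col + length < pvW board) &&
           pvCell board (row + length) (col + length) == " ")) := by
      congr 1
      · by_cases hb : 0 < k
        · rw [hcell (k - 1) (by omega) (by omega),
            show row - k + (k - 1) = row - 1 from by omega,
            show col - k + (k - 1) = col - 1 from by omega]
          simp [hb, show (1:Int) <= row from by omega, show (1:Int) <= col from by omega]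
        · have : ¬((1:Int) <= row) ∨ ¬((1:Int) <= col) := by omega
          rcases this with h | h <;> simp [hb, h]
      · by_cases hf : length < m
        · rw [hcell (k + length) (by omega) (by omega),
            show row - k + (k + length) = row + length from by omega,
            show col - k + (k + length) = col + length from by omega]
          simp [show k + length < k + m from by omega,
            show row + length < (board.length : Int) from by omega,
            show col + length < pvW board from by omega]
        · have : ¬(row + length < (board.length : Int)) ∨ ¬(col + length < pvW board) := by omega
          have hkl : ¬(k + length < k + m) := by omega
          rcases this with h | h <;> simp [hkl, h]
    rw [hends]
    simp only [Bool.true_and, Bool.and_assoc]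
  · have hkl : ¬(k + length - 1 < k + m) := by omega
    have : ¬(row + length - 1 < (board.length : Int)) ∨ ¬(col + length - 1 < pvW board) := by omega
    rcases this with h | h <;> simp [hkl, h]

theorem pvDiag2 (board : List (List String)) (row col length : Int) (player : String)
    (hr0 : 0 <= row) (hrH : row < (board.length : Int))
    (hc0 : 0 <= col) (hcW : col < pvW board) (hl : 0 <= length) :
    is_one_side_open board row col "diagonal2" length player =
      is_one_side_open_alt board row col "diagonal2" length player := by
  have e1 : (("diagonal2" : String) == "horizontal") = false := by decide
  have e2 : (("diagonal2" : String) == "vertical") = false := by decide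
  have e3 : (("diagonal2" : String) == "diagonal1") = false := by decide
  unfold is_one_side_open is_one_side_open_alt pvLine
  simp only [e1, e2, e3, Bool.false_eq_true, if_false, beq_self_eq_true, if_true]
  rw [pvIfA, pvIfB]
  generalize hk : min ((board.length : Int) - 1 - row) col = k
  generalize hm : min (row + 1) (pvW board - col) = m
  have hk0 : 0 <= k := by omega
  have hm1 : 1 <= m := by omega
  have hlenL : ((((PySem.List.pyRange 0 (k + m) 1).map
      (fun t => pvCell board (row + k - t) (col - k + t))).length : Int)) = k + m := by
    simp [PySem.List.length_pyRange_one]; omega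
  rw [pvSliceRep _ k length player hk0 (by rw [hlenL]; omega) hl, hlenL]
  have hcell : ∀ t : Int, 0 <= t → t < k + m →
      PySem.List.pyGetD ((PySem.List.pyRange 0 (k + m) 1).map
        (fun t => pvCell board (row + k - t) (col - k + t))) t "" =
        pvCell board (row + k - t) (col - k + t) :=
    fun t h1 h2 => PySem.List.pyGetD_map_pyRange_of_nonneg _ (k + m) t "" h1 h2
  by_cases hg : length <= m
  · have f1 : row - length + 1 >= 0 := by omega
    have f2 : col + length - 1 < pvW board := by omega
    have f3 : k + length - 1 < k + m := by omega
    have hscan : ((PySem.List.pyRange 0 length 1).all fun i =>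
        PySem.List.pyGetD ((PySem.List.pyRange 0 (k + m) 1).map
          (fun t => pvCell board (row + k - t) (col - k + t))) (k + i) "" == player) =
        ((PySem.List.pyRange 0 length 1).all fun i => pvCell board (row - i) (col + i) == player) := by
      apply pvAllCongrMem
      intro i hi
      rw [PySem.List.mem_pyRange_one] at hi
      rw [hcell (k + i) (by omega) (by omega)]
      rw [show row + k - (k + i) = row - i from by omega, show col - k + (k + i) = col + i from by omega]
    rw [hscan]
    simp only [f1, f2, f3, decide_true]
    have hends : (decide (k > 0) && PySem.List.pyGetD ((PySem.List.pyRange 0 (k + m) 1).map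
          (fun t => pvCell board (row + k - t) (col - k + t))) (k - 1) "" == " " ||
        decide (k + length < k + m) && PySem.List.pyGetD ((PySem.List.pyRange 0 (k + m) 1).map
          (fun t => pvCell board (row + k - t) (col - k + t))) (k + length) "" == " ") =
        (decide (row + 1 < (board.length : Int)) && (decide (col - 1 >= 0) && pvCell board (row + 1) (col - 1) == " ") ||
         decide (row - length >= 0) && (decide (col + length < pvW board) &&
           pvCell board (row - length) (col + length) == " ")) := by
      congr 1
      · by_cases hb : 0 < k
        · rw [hcell (k - 1) (by omega) (by omega),
            show row + k - (k - 1) = row + 1 from by omega,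
            show col - k + (k - 1) = col - 1 from by omega]
          simp [hb, show row + 1 < (board.length : Int) from by omega, show (1:Int) <= col from by omega]
        · have : ¬(row + 1 < (board.length : Int)) ∨ ¬((1:Int) <= col) := by omega
          rcases this with h | h <;> simp [hb, h]
      · by_cases hf : length < m
        · rw [hcell (k + length) (by omega) (by omega),
            show row + k - (k + length) = row - length from by omega,
            show col - k + (k + length) = col + length from by omega]
          simp [show k + length < k + m from by omega,
            show length <= row from by omega,
            show col + length < pvW board from by omega]
        · have : ¬(length <= row) ∨ ¬(col + length < pvW board) := by omega
          have hkl : ¬(k + length < k + m) := by omega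
          rcases this with h | h <;> simp [hkl, h]
    rw [hends]
    simp only [Bool.true_and, Bool.and_assoc]
  · have hkl : ¬(k + length - 1 < k + m) := by omega
    have : ¬(row - length + 1 >= 0) ∨ ¬(col + length - 1 < pvW board) := by omega
    rcases this with h | h <;> simp [hkl, h]

-- ===== VERDICT (by name: the statement is the Claim_ definition above) =====
theorem is_one_side_open_spec : Claim_equal_is_one_side_open := by
  intro board row col direction length player _ hpre
  obtain ⟨hne, hdir⟩ := hpre
  unfold Spec_is_one_side_open
  by_cases h1 : direction = "horizontal"
  · subst h1
    obtain ⟨hrect, hr0, hrH, hc0, hcW, hl⟩ := hdir (Or.inl rfl)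
    exact pvHor board row col length player hrect hr0 hrH hc0 hcW hl
  by_cases h2 : direction = "vertical"
  · subst h2
    obtain ⟨hrect, hr0, hrH, hc0, hcW, hl⟩ := hdir (Or.inr (Or.inl rfl))
    exact pvVer board row col length player hr0 hrH hl
  by_cases h3 : direction = "diagonal1"
  · subst h3
    obtain ⟨hrect, hr0, hrH, hc0, hcW, hl⟩ := hdir (Or.inr (Or.inr (Or.inl rfl)))
    exact pvDiag1 board row col length player hr0 hrH hc0 hcW hl
  by_cases h4 : direction = "diagonal2"
  · subst h4
    obtain ⟨hrect, hr0, hrH, hc0, hcW, hl⟩ := hdir (Or.inr (Or.inr (Or.inr rfl)))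
    exact pvDiag2 board row col length player hr0 hrH hc0 hcW hl
  · have g1 : (direction == "horizontal") = false := by simp [h1]
    have g2 : (direction == "vertical") = false := by simp [h2]
    have g3 : (direction == "diagonal1") = false := by simp [h3]
    have g4 : (direction == "diagonal2") = false := by simp [h4]
    unfold is_one_side_open is_one_side_open_alt pvLine
    simp [g1, g2, g3, g4]
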